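-- pv_equiv track=rewrite | github.com/choxos/KRTMaker | krt_validation.py | validate_krt_completeness
-- ===== SOURCE A (Python) =====
-- from typing import List, Dict, Tuple, Optional
--
-- def validate_krt_completeness(krt_data: List[Dict[str, str]]) -> List[str]:
--     """
--     Validate KRT data according to ASAP Open Science guidelines.
--
--     Args:
--         krt_data: List of KRT entries
--
--     Returns:
--         List of validation warnings/recommendations
--     """
--     warnings = []
--
--     if not krt_data:
--         warnings.append("No KRT entries found. Please ensure all resources are properly extracted.")
--         return warnings
--
--     # Check for required fields in each entry
--     required_fields = ['RESOURCE TYPE', 'RESOURCE NAME', 'IDENTIFIER', 'NEW/REUSE']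
--
--     for i, entry in enumerate(krt_data, 1):
--         for field in required_fields:
--             value = entry.get(field, '').strip()
--             if not value or value.lower() in ['n/a', 'na', 'unknown', 'none', '']:
--                 warnings.append(f"Row {i}: Missing required field '{field}'")
--
--     # Check for new dataset requirement
--     has_new_dataset = any(
--         entry.get('RESOURCE TYPE', '').lower() == 'dataset' and
--         entry.get('NEW/REUSE', '').lower() == 'new'
--         for entry in krt_data
--     )
--
--     if not has_new_dataset:
--         warnings.append(
--             "This KRT does not include any new data. If you did collect data, add a row for the data you collected. "
--             "If you did not collect data, add the text \"No new primary data were collected in this study\" "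
--             "to your Data/Code Availability Statement."
--         )
--
--     # Check for new software/code requirement
--     has_new_code = any(
--         entry.get('RESOURCE TYPE', '').lower() == 'software/code' and
--         entry.get('NEW/REUSE', '').lower() == 'new'
--         for entry in krt_data
--     )
--
--     if not has_new_code:
--         warnings.append(
--             "This KRT does not include any new code. If you did generate code for this study, add a row outlining "
--             "the code you generated. If you did not generate any code, add the text \"No code was generated for this study; "
--             "all data cleaning, preprocessing, analysis, and visualization was performed using [insert program name(s)]\" "
--             "to your Data/Code Availability Statement."
--         )
--
--     # Check for valid resource types
--     valid_resource_types = {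
--         'dataset', 'software/code', 'protocol', 'antibody', 'bacterial strain',
--         'viral vector', 'biological sample', 'chemical, peptide, or recombinant protein',
--         'critical commercial assay', 'experimental model: cell line',
--         'experimental model: organism/strain', 'oligonucleotide', 'recombinant dna', 'other'
--     }
--
--     for i, entry in enumerate(krt_data, 1):
--         resource_type = entry.get('RESOURCE TYPE', '').lower().strip()
--         if resource_type and resource_type not in valid_resource_types:
--             warnings.append(f"Row {i}: Invalid resource type '{entry.get('RESOURCE TYPE')}'. Must be one of the predefined types.")
--
--     # Check for proper identifier formats
--     for i, entry in enumerate(krt_data, 1):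
--         identifier = entry.get('IDENTIFIER', '').strip()
--         resource_type = entry.get('RESOURCE TYPE', '').lower()
--
--         if identifier and identifier.lower() not in ['no identifier exists']:
--             # Check for specific identifier requirements
--             if resource_type == 'antibody' and 'rrid:' not in identifier.lower():
--                 warnings.append(f"Row {i}: Antibody should include RRID identifier when available")
--
--             if resource_type == 'software/code' and not any(x in identifier.lower() for x in ['rrid:', 'doi:', 'http', 'github']):
--                 warnings.append(f"Row {i}: Software should include RRID, DOI, or URL identifier when available")
--
--     # Check for missing version numbers in software
--     for i, entry in enumerate(krt_data, 1):
--         resource_type = entry.get('RESOURCE TYPE', '').lower()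
--         resource_name = entry.get('RESOURCE NAME', '')
--
--         if resource_type == 'software/code' and resource_name:
--             # Check if version number is included
--             if not any(x in resource_name.lower() for x in ['version', 'v.', 'v ', ' v']):
--                 warnings.append(f"Row {i}: Software '{resource_name}' should include version number")
--
--     return warnings
-- ===== SOURCE B (Python) =====
-- # B: one pass over enumerate(krt_data, 1) bucketing warnings into four lists and two flags,
-- # then concatenating in A's output order (simpler decomposition; six scans -> one).
--
-- REQUIRED_FIELDS = ['RESOURCE TYPE', 'RESOURCE NAME', 'IDENTIFIER', 'NEW/REUSE']
--
-- VALID_RESOURCE_TYPES = {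
--     'dataset', 'software/code', 'protocol', 'antibody', 'bacterial strain',
--     'viral vector', 'biological sample', 'chemical, peptide, or recombinant protein',
--     'critical commercial assay', 'experimental model: cell line',
--     'experimental model: organism/strain', 'oligonucleotide', 'recombinant dna', 'other'
-- }
--
-- DATASET_MSG = (
--     "This KRT does not include any new data. If you did collect data, add a row for the data you collected. "
--     "If you did not collect data, add the text \"No new primary data were collected in this study\" "
--     "to your Data/Code Availability Statement."
-- )
--
-- CODE_MSG = (
--     "This KRT does not include any new code. If you did generate code for this study, add a row outlining "
--     "the code you generated. If you did not generate any code, add the text \"No code was generated for this study; "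
--     "all data cleaning, preprocessing, analysis, and visualization was performed using [insert program name(s)]\" "
--     "to your Data/Code Availability Statement."
-- )
--
--
-- def _missing_warnings(i, entry):
--     out = []
--     for field in REQUIRED_FIELDS:
--         value = entry.get(field, '').strip()
--         if not value or value.lower() in ('n/a', 'na', 'unknown', 'none', ''):
--             out.append(f"Row {i}: Missing required field '{field}'")
--     return out
--
--
-- def _type_warnings(i, entry):
--     resource_type = entry.get('RESOURCE TYPE', '').lower().strip()
--     if resource_type and resource_type not in VALID_RESOURCE_TYPES:
--         return [f"Row {i}: Invalid resource type '{entry.get('RESOURCE TYPE')}'. Must be one of the predefined types."]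
--     return []
--
--
-- def _identifier_warnings(i, entry):
--     identifier = entry.get('IDENTIFIER', '').strip()
--     resource_type = entry.get('RESOURCE TYPE', '').lower()
--     out = []
--     if identifier and identifier.lower() not in ('no identifier exists',):
--         if resource_type == 'antibody' and 'rrid:' not in identifier.lower():
--             out.append(f"Row {i}: Antibody should include RRID identifier when available")
--         if resource_type == 'software/code' and not any(x in identifier.lower() for x in ('rrid:', 'doi:', 'http', 'github')):
--             out.append(f"Row {i}: Software should include RRID, DOI, or URL identifier when available")
--     return out
--
--
-- def _version_warnings(i, entry):
--     resource_type = entry.get('RESOURCE TYPE', '').lower()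
--     resource_name = entry.get('RESOURCE NAME', '')
--     if resource_type == 'software/code' and resource_name:
--         if not any(x in resource_name.lower() for x in ('version', 'v.', 'v ', ' v')):
--             return [f"Row {i}: Software '{resource_name}' should include version number"]
--     return []
--
--
-- def _is_new(entry, kind):
--     return entry.get('RESOURCE TYPE', '').lower() == kind and entry.get('NEW/REUSE', '').lower() == 'new'
--
--
-- def validate_krt_completeness(krt_data):
--     if not krt_data:
--         return ["No KRT entries found. Please ensure all resources are properly extracted."]
--
--     missing, bad_types, id_warns, ver_warns = [], [], [], []
--     has_new_dataset = has_new_code = False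
--     for i, entry in enumerate(krt_data, 1):
--         missing += _missing_warnings(i, entry)
--         bad_types += _type_warnings(i, entry)
--         id_warns += _identifier_warnings(i, entry)
--         ver_warns += _version_warnings(i, entry)
--         has_new_dataset = has_new_dataset or _is_new(entry, 'dataset')
--         has_new_code = has_new_code or _is_new(entry, 'software/code')
--
--     result = missing
--     if not has_new_dataset:
--         result.append(DATASET_MSG)
--     if not has_new_code:
--         result.append(CODE_MSG)
--     return result + bad_types + id_warns + ver_warns
-- ===== Notes on version B (the rewrite author's own statement) =====
-- stated objective: alternative
-- what changed: Replaces A's six separate scans (one nested field loop, two any() scans, three enumerate loops) with a single pass over enumerate(krt_data, 1) that buckets warnings into four lists and ORs two flags, then concatenates the buckets in A's output order; same cost, different traversal decomposition.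
import Mathlib
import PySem

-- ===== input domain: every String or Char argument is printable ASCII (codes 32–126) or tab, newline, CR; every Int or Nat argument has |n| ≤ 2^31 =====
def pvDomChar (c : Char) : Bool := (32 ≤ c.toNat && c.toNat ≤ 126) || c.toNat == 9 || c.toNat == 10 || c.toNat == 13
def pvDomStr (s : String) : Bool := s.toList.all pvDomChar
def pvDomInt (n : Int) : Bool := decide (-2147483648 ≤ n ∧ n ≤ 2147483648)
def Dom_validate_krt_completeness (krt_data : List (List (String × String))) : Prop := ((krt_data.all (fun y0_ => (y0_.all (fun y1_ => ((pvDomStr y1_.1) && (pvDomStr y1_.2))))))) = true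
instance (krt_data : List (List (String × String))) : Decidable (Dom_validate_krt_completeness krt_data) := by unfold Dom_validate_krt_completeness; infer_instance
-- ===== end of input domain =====

-- B changes the decomposition only: one bucketed pass over enumerate(krt_data, 1) instead of A's
-- six separate scans; return values are proved identical (no speed claim).

-- shared module-level constants (the message strings and tables both Pythons carry)
def pvNoEntriesMsg : String := "No KRT entries found. Please ensure all resources are properly extracted."
def pvDatasetMsg : String := "This KRT does not include any new data. If you did collect data, add a row for the data you collected. If you did not collect data, add the text \"No new primary data were collected in this study\" to your Data/Code Availability Statement."
def pvCodeMsg : String := "This KRT does not include any new code. If you did generate code for this study, add a row outlining the code you generated. If you did not generate any code, add the text \"No code was generated for this study; all data cleaning, preprocessing, analysis, and visualization was performed using [insert program name(s)]\" to your Data/Code Availability Statement."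
def pvRequiredFields : List String := ["RESOURCE TYPE", "RESOURCE NAME", "IDENTIFIER", "NEW/REUSE"]
def pvValidResourceTypes : PySem.Set String := PySem.Set.ofList
  ["dataset", "software/code", "protocol", "antibody", "bacterial strain",
   "viral vector", "biological sample", "chemical, peptide, or recombinant protein",
   "critical commercial assay", "experimental model: cell line",
   "experimental model: organism/strain", "oligonucleotide", "recombinant dna", "other"]
-- entry.get(k, '') on the association-list dict (first match)
def pvGet (entry : List (String × String)) (k : String) : String := (PySem.Dict.mk entry).getD k ""

-- ===== PORT A =====
def validate_krt_completeness (krt_data : List (List (String × String))) : List String :=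
  if krt_data = [] then [pvNoEntriesMsg]
  else
    let w1 := (PySem.List.enumerate krt_data 1).foldl (fun acc p =>
      pvRequiredFields.foldl (fun acc field =>
        let value := PySem.Str.strip (pvGet p.2 field)
        if value == "" || ["n/a", "na", "unknown", "none", ""].contains (PySem.Str.lower value) then
          acc ++ ["Row " ++ PySem.Int.toStr p.1 ++ ": Missing required field '" ++ field ++ "'"]
        else acc) acc) []
    let has_new_dataset := krt_data.any (fun entry =>
      PySem.Str.lower (pvGet entry "RESOURCE TYPE") == "dataset" &&
      PySem.Str.lower (pvGet entry "NEW/REUSE") == "new")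
    let w2 := if has_new_dataset then w1 else w1 ++ [pvDatasetMsg]
    let has_new_code := krt_data.any (fun entry =>
      PySem.Str.lower (pvGet entry "RESOURCE TYPE") == "software/code" &&
      PySem.Str.lower (pvGet entry "NEW/REUSE") == "new")
    let w3 := if has_new_code then w2 else w2 ++ [pvCodeMsg]
    let w4 := (PySem.List.enumerate krt_data 1).foldl (fun acc p =>
      let resource_type := PySem.Str.strip (PySem.Str.lower (pvGet p.2 "RESOURCE TYPE"))
      if !(resource_type == "") && !(pvValidResourceTypes.contains resource_type) then
        acc ++ ["Row " ++ PySem.Int.toStr p.1 ++ ": Invalid resource type '" ++ pvGet p.2 "RESOURCE TYPE" ++ "'. Must be one of the predefined types."]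
      else acc) w3
    let w5 := (PySem.List.enumerate krt_data 1).foldl (fun acc p =>
      let identifier := PySem.Str.strip (pvGet p.2 "IDENTIFIER")
      let resource_type := PySem.Str.lower (pvGet p.2 "RESOURCE TYPE")
      if !(identifier == "") && !(["no identifier exists"].contains (PySem.Str.lower identifier)) then
        let acc1 := if resource_type == "antibody" && !(PySem.Str.isIn "rrid:" (PySem.Str.lower identifier)) then
            acc ++ ["Row " ++ PySem.Int.toStr p.1 ++ ": Antibody should include RRID identifier when available"]
          else acc
        if resource_type == "software/code" && !(["rrid:", "doi:", "http", "github"].any (fun x => PySem.Str.isIn x (PySem.Str.lower identifier))) then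
          acc1 ++ ["Row " ++ PySem.Int.toStr p.1 ++ ": Software should include RRID, DOI, or URL identifier when available"]
        else acc1
      else acc) w4
    let w6 := (PySem.List.enumerate krt_data 1).foldl (fun acc p =>
      let resource_type := PySem.Str.lower (pvGet p.2 "RESOURCE TYPE")
      let resource_name := pvGet p.2 "RESOURCE NAME"
      if resource_type == "software/code" && !(resource_name == "") then
        if !(["version", "v.", "v ", " v"].any (fun x => PySem.Str.isIn x (PySem.Str.lower resource_name))) then
          acc ++ ["Row " ++ PySem.Int.toStr p.1 ++ ": Software '" ++ resource_name ++ "' should include version number"]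
        else acc
      else acc) w5
    w6

-- ===== PORT B =====
def pvMissingWarnings (i : Int) (entry : List (String × String)) : List String :=
  pvRequiredFields.foldl (fun out field =>
    let value := PySem.Str.strip (pvGet entry field)
    if value == "" || ["n/a", "na", "unknown", "none", ""].contains (PySem.Str.lower value) then
      out ++ ["Row " ++ PySem.Int.toStr i ++ ": Missing required field '" ++ field ++ "'"]
    else out) []

def pvTypeWarnings (i : Int) (entry : List (String × String)) : List String :=
  let resource_type := PySem.Str.strip (PySem.Str.lower (pvGet entry "RESOURCE TYPE"))
  if !(resource_type == "") && !(pvValidResourceTypes.contains resource_type) then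
    ["Row " ++ PySem.Int.toStr i ++ ": Invalid resource type '" ++ pvGet entry "RESOURCE TYPE" ++ "'. Must be one of the predefined types."]
  else []

def pvIdentifierWarnings (i : Int) (entry : List (String × String)) : List String :=
  let identifier := PySem.Str.strip (pvGet entry "IDENTIFIER")
  let resource_type := PySem.Str.lower (pvGet entry "RESOURCE TYPE")
  if !(identifier == "") && !(["no identifier exists"].contains (PySem.Str.lower identifier)) then
    let out : List String := []
    let out := if resource_type == "antibody" && !(PySem.Str.isIn "rrid:" (PySem.Str.lower identifier)) then
        out ++ ["Row " ++ PySem.Int.toStr i ++ ": Antibody should include RRID identifier when available"]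
      else out
    if resource_type == "software/code" && !(["rrid:", "doi:", "http", "github"].any (fun x => PySem.Str.isIn x (PySem.Str.lower identifier))) then
      out ++ ["Row " ++ PySem.Int.toStr i ++ ": Software should include RRID, DOI, or URL identifier when available"]
    else out
  else []

def pvVersionWarnings (i : Int) (entry : List (String × String)) : List String :=
  let resource_type := PySem.Str.lower (pvGet entry "RESOURCE TYPE")
  let resource_name := pvGet entry "RESOURCE NAME"
  if resource_type == "software/code" && !(resource_name == "") then
    if !(["version", "v.", "v ", " v"].any (fun x => PySem.Str.isIn x (PySem.Str.lower resource_name))) then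
      ["Row " ++ PySem.Int.toStr i ++ ": Software '" ++ resource_name ++ "' should include version number"]
    else []
  else []

def pvIsNew (entry : List (String × String)) (kind : String) : Bool :=
  PySem.Str.lower (pvGet entry "RESOURCE TYPE") == kind &&
  PySem.Str.lower (pvGet entry "NEW/REUSE") == "new"

def validate_krt_completeness_alt (krt_data : List (List (String × String))) : List String :=
  if krt_data = [] then [pvNoEntriesMsg]
  else
    let st := (PySem.List.enumerate krt_data 1).foldl
      (fun st p =>
        match st, p with
        | (missing, bad_types, id_warns, ver_warns, has_new_dataset, has_new_code), (i, entry) =>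
          (missing ++ pvMissingWarnings i entry,
           bad_types ++ pvTypeWarnings i entry,
           id_warns ++ pvIdentifierWarnings i entry,
           ver_warns ++ pvVersionWarnings i entry,
           has_new_dataset || pvIsNew entry "dataset",
           has_new_code || pvIsNew entry "software/code"))
      (([] : List String), ([] : List String), ([] : List String), ([] : List String), false, false)
    match st with
    | (missing, bad_types, id_warns, ver_warns, has_new_dataset, has_new_code) =>
      let result := missing
      let result := if has_new_dataset then result else result ++ [pvDatasetMsg]
      let result := if has_new_code then result else result ++ [pvCodeMsg]
      result ++ bad_types ++ id_warns ++ ver_warns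

-- ===== PRECONDITION & SPEC =====
def Spec_validate_krt_completeness (krt_data : List (List (String × String))) (out : List String) : Prop := out = validate_krt_completeness_alt krt_data
instance (krt_data : List (List (String × String))) (out : List String) : Decidable (Spec_validate_krt_completeness krt_data out) := by unfold Spec_validate_krt_completeness; infer_instance

-- ===== CLAIM (what is proved, stated in full; the proofs are below) =====
def Claim_equal_validate_krt_completeness : Prop := ∀ (krt_data : List (List (String × String))), Dom_validate_krt_completeness krt_data → Spec_validate_krt_completeness krt_data (validate_krt_completeness krt_data)

-- ===== LEMMAS AND PROOFS =====

-- a fold whose step appends row output f p equals accumulator ++ flatMap f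
theorem pvFoldlRow {α : Type} (step : List String → α → List String) (f : α → List String)
    (h : ∀ acc p, step acc p = acc ++ f p) :
    ∀ (l : List α) (acc : List String), l.foldl step acc = acc ++ l.flatMap f := by
  intro l
  induction l with
  | nil => intro acc; simp [List.foldl]
  | cons x xs ih => intro acc; simp [List.foldl, h, ih, List.flatMap_cons, List.append_assoc]

theorem pvAnyEnum {α : Type} (q : α → Bool) :
    ∀ (l : List α) (s : Int), (PySem.List.enumerate l s).any (fun p => q p.2) = l.any q := by
  intro l
  induction l with
  | nil => intro s; simp [PySem.List.enumerate_nil]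
  | cons x xs ih => intro s; simp [PySem.List.enumerate_cons, List.any_cons, ih]

-- characterisation of B's single bucketed pass
theorem pvAltFold :
    ∀ (l : List (Int × List (String × String)))
      (m t idw v : List String) (d c : Bool),
      l.foldl
        (fun st p =>
          match st, p with
          | (missing, bad_types, id_warns, ver_warns, has_new_dataset, has_new_code), (i, entry) =>
            (missing ++ pvMissingWarnings i entry,
             bad_types ++ pvTypeWarnings i entry,
             id_warns ++ pvIdentifierWarnings i entry,
             ver_warns ++ pvVersionWarnings i entry,
             has_new_dataset || pvIsNew entry "dataset",
             has_new_code || pvIsNew entry "software/code"))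
        (m, t, idw, v, d, c)
      = (m ++ l.flatMap (fun p => pvMissingWarnings p.1 p.2),
         t ++ l.flatMap (fun p => pvTypeWarnings p.1 p.2),
         idw ++ l.flatMap (fun p => pvIdentifierWarnings p.1 p.2),
         v ++ l.flatMap (fun p => pvVersionWarnings p.1 p.2),
         d || l.any (fun p => pvIsNew p.2 "dataset"),
         c || l.any (fun p => pvIsNew p.2 "software/code")) := by
  intro l
  induction l with
  | nil => intro m t idw v d c; simp [List.foldl]
  | cons x xs ih =>
    intro m t idw v d c
    obtain ⟨i, entry⟩ := x
    simp [List.foldl, ih, List.flatMap_cons, List.any_cons, List.append_assoc, Bool.or_assoc]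

-- A's per-row steps are exactly B's row helpers
theorem pvStepMissing (acc : List String) (p : Int × List (String × String)) :
    pvRequiredFields.foldl (fun acc field =>
      let value := PySem.Str.strip (pvGet p.2 field)
      if value == "" || ["n/a", "na", "unknown", "none", ""].contains (PySem.Str.lower value) then
        acc ++ ["Row " ++ PySem.Int.toStr p.1 ++ ": Missing required field '" ++ field ++ "'"]
      else acc) acc = acc ++ pvMissingWarnings p.1 p.2 := by
  unfold pvMissingWarnings
  rw [PySem.List.foldl_append_if, PySem.List.foldl_append_if]
  simp

theorem pvStepType (acc : List String) (p : Int × List (String × String)) :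
    (let resource_type := PySem.Str.strip (PySem.Str.lower (pvGet p.2 "RESOURCE TYPE"))
     if !(resource_type == "") && !(pvValidResourceTypes.contains resource_type) then
       acc ++ ["Row " ++ PySem.Int.toStr p.1 ++ ": Invalid resource type '" ++ pvGet p.2 "RESOURCE TYPE" ++ "'. Must be one of the predefined types."]
     else acc) = acc ++ pvTypeWarnings p.1 p.2 := by
  unfold pvTypeWarnings
  dsimp only
  split_ifs <;> simp

theorem pvStepIdentifier (acc : List String) (p : Int × List (String × String)) :
    (let identifier := PySem.Str.strip (pvGet p.2 "IDENTIFIER")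
     let resource_type := PySem.Str.lower (pvGet p.2 "RESOURCE TYPE")
     if !(identifier == "") && !(["no identifier exists"].contains (PySem.Str.lower identifier)) then
       let acc1 := if resource_type == "antibody" && !(PySem.Str.isIn "rrid:" (PySem.Str.lower identifier)) then
           acc ++ ["Row " ++ PySem.Int.toStr p.1 ++ ": Antibody should include RRID identifier when available"]
         else acc
       if resource_type == "software/code" && !(["rrid:", "doi:", "http", "github"].any (fun x => PySem.Str.isIn x (PySem.Str.lower identifier))) then
         acc1 ++ ["Row " ++ PySem.Int.toStr p.1 ++ ": Software should include RRID, DOI, or URL identifier when available"]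
       else acc1
     else acc) = acc ++ pvIdentifierWarnings p.1 p.2 := by
  unfold pvIdentifierWarnings
  dsimp only
  split_ifs <;> simp [List.append_assoc]

theorem pvStepVersion (acc : List String) (p : Int × List (String × String)) :
    (let resource_type := PySem.Str.lower (pvGet p.2 "RESOURCE TYPE")
     let resource_name := pvGet p.2 "RESOURCE NAME"
     if resource_type == "software/code" && !(resource_name == "") then
       if !(["version", "v.", "v ", " v"].any (fun x => PySem.Str.isIn x (PySem.Str.lower resource_name))) then
         acc ++ ["Row " ++ PySem.Int.toStr p.1 ++ ": Software '" ++ resource_name ++ "' should include version number"]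
       else acc
     else acc) = acc ++ pvVersionWarnings p.1 p.2 := by
  unfold pvVersionWarnings
  dsimp only
  split_ifs <;> simp

-- ===== VERDICT (by name: the statement is the Claim_ definition above) =====
theorem validate_krt_completeness_spec : Claim_equal_validate_krt_completeness := by
  unfold Claim_equal_validate_krt_completeness Spec_validate_krt_completeness
  intro krt_data _
  unfold validate_krt_completeness validate_krt_completeness_alt
  by_cases hnil : krt_data = []
  · simp [hnil]
  · simp only [hnil, if_false]
    rw [pvAltFold]
    rw [pvFoldlRow _ _ pvStepMissing]
    rw [pvFoldlRow _ _ pvStepType]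
    rw [pvFoldlRow _ _ pvStepIdentifier]
    rw [pvFoldlRow _ _ pvStepVersion]
    rw [pvAnyEnum (fun entry => pvIsNew entry "dataset") krt_data 1]
    rw [pvAnyEnum (fun entry => pvIsNew entry "software/code") krt_data 1]
    simp only [pvIsNew, Bool.false_or, List.nil_append]
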